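-- pv_equiv track=rewrite | github.com/SeifMejri21/tn-football-db | src/parsers/parser_22.py | correct_goals
-- ===== SOURCE A (Python) =====
-- def correct_goals(names_list):
--     concatenated_list = []
--     buffer = ""
--     for name in names_list:
--         if name[0].isdigit():
--             if buffer:
--                 concatenated_list[-1] += " " + buffer
--                 buffer = ""
--             concatenated_list.append(name)
--         else:
--             buffer = name
--     if buffer:
--         concatenated_list[-1] += " " + buffer
--
--     return concatenated_list
-- ===== SOURCE B (Python) =====
-- def correct_goals(names_list):
--     # Run-based rewrite: walk maximal runs of digit-started / non-digit-started
--     # names; a digit run is appended wholesale, a non-digit run contributes only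
--     # its last name, glued onto the previous entry.
--     result = []
--     rest = names_list
--     while rest:
--         if rest[0][0].isdigit():
--             k = 0
--             while k < len(rest) and rest[k][0].isdigit():
--                 k += 1
--             result += rest[:k]
--         else:
--             k = 0
--             while k < len(rest) and not rest[k][0].isdigit():
--                 k += 1
--             result[-1] += " " + rest[k - 1]
--         rest = rest[k:]
--     return result
-- ===== Notes on version B (the rewrite author's own statement) =====
-- stated objective: alternative
-- what changed: Replaced A's element-by-element pass carrying a mutable string buffer with a run-based two-pointer scan over maximal digit/non-digit runs: a digit run is appended wholesale and only the last name of a non-digit run is glued to the previous entry, so no buffer state is threaded.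
import Mathlib
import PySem

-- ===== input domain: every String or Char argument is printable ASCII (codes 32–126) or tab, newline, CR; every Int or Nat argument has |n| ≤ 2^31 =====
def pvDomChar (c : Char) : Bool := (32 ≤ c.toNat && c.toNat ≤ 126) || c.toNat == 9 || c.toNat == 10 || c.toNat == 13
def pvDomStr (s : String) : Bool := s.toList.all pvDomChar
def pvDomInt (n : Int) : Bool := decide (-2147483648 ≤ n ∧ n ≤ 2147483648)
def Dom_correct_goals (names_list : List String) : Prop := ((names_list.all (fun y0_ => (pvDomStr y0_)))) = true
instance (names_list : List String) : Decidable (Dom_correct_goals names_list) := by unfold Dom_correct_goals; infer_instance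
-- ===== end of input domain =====

-- B replaces A's buffered element-by-element pass with a run-based two-pointer scan
-- over maximal digit/non-digit runs (alternative decomposition, same O(n) cost).


-- ===== PORT A =====
-- name[0].isdigit(): on the ASCII domain Python's isdigit is Char.isDigit.
-- Python raises IndexError on an empty name (excluded by Pre_); the port returns false there.
def headIsDigit (s : String) : Bool :=
  match s.toList with
  | [] => false
  | c :: _ => c.isDigit

-- Python "concatenated_list[-1] += \" \" + buffer"; on an empty list Python raises
-- IndexError (excluded by Pre_); the port grows a fresh entry there.
def setLast (acc : List String) (b : String) : List String :=
  acc.dropLast ++ [acc.getLastD "" ++ " " ++ b]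

def cgLoop : List String → List String → String → List String
  | [], acc, buffer => if buffer ≠ "" then setLast acc buffer else acc
  | name :: rest, acc, buffer =>
    if headIsDigit name then
      cgLoop rest ((if buffer ≠ "" then setLast acc buffer else acc) ++ [name]) ""
    else
      cgLoop rest acc name

def correct_goals (names_list : List String) : List String :=
  cgLoop names_list [] ""

-- ===== PORT B =====
-- Source B's inner index loop computes k = length of the maximal prefix of `rest`
-- satisfying the predicate, then uses rest[:k] (= takeWhile), rest[k-1]
-- (= last of that prefix) and rest[k:] (= dropWhile); ported exactly as such.
def cgAltLoop : List String → List String → List String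
  | [], res => res
  | x :: xs, res =>
    if _h : headIsDigit x then
      cgAltLoop ((x :: xs).dropWhile headIsDigit) (res ++ (x :: xs).takeWhile headIsDigit)
    else
      cgAltLoop ((x :: xs).dropWhile (fun n => !headIsDigit n))
        (setLast res (((x :: xs).takeWhile (fun n => !headIsDigit n)).getLastD ""))
  termination_by l _ => l.length
  decreasing_by
  · simp only [List.dropWhile_cons, _h, if_true]
    exact Nat.lt_succ_of_le (List.length_dropWhile_le _ _)
  · simp only [List.dropWhile_cons, _h, Bool.not_false, if_true]
    exact Nat.lt_succ_of_le (List.length_dropWhile_le _ _)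

def correct_goals_alt (names_list : List String) : List String :=
  cgAltLoop names_list []

-- ===== PRECONDITION & SPEC =====
-- Pre_ excludes exactly the inputs where the Python A raises IndexError:
-- an empty name (name[0]) or a first name not starting with a digit
-- (the buffered name is then flushed into an empty list via [-1]).
def Pre_correct_goals (names_list : List String) : Prop :=
  (∀ n ∈ names_list, n ≠ "") ∧
  (names_list = [] ∨ headIsDigit (names_list.headD "") = true)
instance (names_list : List String) : Decidable (Pre_correct_goals names_list) := by
  unfold Pre_correct_goals; infer_instance

def pvWitness_correct_goals : List String := ["1 Foo", "Bar", "2 Baz"]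

def Spec_correct_goals (names_list : List String) (out : List String) : Prop := out = correct_goals_alt names_list
instance (names_list : List String) (out : List String) : Decidable (Spec_correct_goals names_list out) := by unfold Spec_correct_goals; infer_instance

-- ===== CLAIM (what is proved, stated in full; the proofs are below) =====
def Claim_equal_correct_goals : Prop := ∀ (names_list : List String), Dom_correct_goals names_list → Pre_correct_goals names_list → Spec_correct_goals names_list (correct_goals names_list)

-- ===== LEMMAS AND PROOFS =====

-- absorbing an already-consumed digit prefix into the accumulator
theorem cgAlt_absorb (xs res : List String) :
    cgAltLoop (xs.dropWhile headIsDigit) (res ++ xs.takeWhile headIsDigit) = cgAltLoop xs res := by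
  cases xs with
  | nil => simp
  | cons y ys =>
    by_cases hy : headIsDigit y = true
    · rw [List.dropWhile_cons_of_pos hy, List.takeWhile_cons_of_pos hy]
      conv_rhs => rw [cgAltLoop, dif_pos hy]
      rw [List.dropWhile_cons_of_pos hy, List.takeWhile_cons_of_pos hy]
    · rw [List.dropWhile_cons_of_neg (by simp [hy]), List.takeWhile_cons_of_neg (by simp [hy])]
      simp

-- absorbing a leading digit-started name into the accumulator
theorem cgAlt_cons_digit (x : String) (xs res : List String) (h : headIsDigit x = true) :
    cgAltLoop (x :: xs) res = cgAltLoop xs (res ++ [x]) := by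
  rw [cgAltLoop, dif_pos h]
  rw [List.dropWhile_cons_of_pos h, List.takeWhile_cons_of_pos h]
  rw [← cgAlt_absorb xs (res ++ [x])]
  simp

-- a non-digit name followed by another non-digit name contributes nothing
theorem cgAlt_cons_nondigit (b x : String) (xs res : List String)
    (hb : headIsDigit b = false) (hx : headIsDigit x = false) :
    cgAltLoop (b :: x :: xs) res = cgAltLoop (x :: xs) res := by
  rw [cgAltLoop, dif_neg (by simp [hb]), cgAltLoop, dif_neg (by simp [hx])]
  rw [List.takeWhile_cons_of_pos (by simp [hb])]
  rw [List.dropWhile_cons_of_pos (by simp [hb])]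
  congr 2
  rw [List.takeWhile_cons_of_pos (p := fun n => !headIsDigit n) (l := xs) (by simp [hx])]
  simp

theorem cgLoop_eq_cgAlt (names : List String) (hne : ∀ n ∈ names, n ≠ "") :
    (∀ acc, cgLoop names acc "" = cgAltLoop names acc) ∧
    (∀ acc b, b ≠ "" → headIsDigit b = false →
      cgLoop names acc b = cgAltLoop (b :: names) acc) := by
  induction names with
  | nil =>
    refine ⟨fun acc => by simp [cgLoop, cgAltLoop], fun acc b hb hbd => ?_⟩
    rw [cgLoop, if_pos hb, cgAltLoop, dif_neg (by simp [hbd])]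
    simp [cgAltLoop, List.takeWhile, hbd, List.dropWhile]
  | cons name rest ih =>
    have hname : name ≠ "" := hne name (by simp)
    have ih' := ih (fun n hn => hne n (by simp [hn]))
    by_cases hd : headIsDigit name = true
    · refine ⟨fun acc => ?_, fun acc b hb hbd => ?_⟩
      · rw [cgLoop, if_pos hd, if_neg (by simp), ih'.1, cgAlt_cons_digit _ _ _ hd]
      · rw [cgLoop, if_pos hd, if_pos hb, ih'.1]
        rw [cgAltLoop, dif_neg (by simp [hbd])]
        rw [List.takeWhile_cons_of_pos (by simp [hbd]),
            List.takeWhile_cons_of_neg (by simp [hd]),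
            List.dropWhile_cons_of_pos (by simp [hbd]),
            List.dropWhile_cons_of_neg (by simp [hd])]
        rw [cgAlt_cons_digit _ _ _ hd]
        simp
    · have hd' : headIsDigit name = false := by simpa using hd
      refine ⟨fun acc => ?_, fun acc b hb hbd => ?_⟩
      · rw [cgLoop, if_neg (by simp [hd']), ih'.2 acc name hname hd']
      · rw [cgLoop, if_neg (by simp [hd']), ih'.2 acc name hname hd',
            cgAlt_cons_nondigit _ _ _ _ hbd hd']

-- ===== VERDICT (by name: the statement is the Claim_ definition above) =====
theorem correct_goals_spec : Claim_equal_correct_goals := by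
  intro names _hdom hpre
  unfold Spec_correct_goals correct_goals correct_goals_alt
  exact (cgLoop_eq_cgAlt names hpre.1).1 []
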